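-- pv_equiv track=rewrite | github.com/abdulwahabchohann/final-year-project | enrich_books_dataset.py | count_keyword_hits
-- ===== SOURCE A (Python) =====
-- from typing import Dict, Iterable, List
--
-- def count_keyword_hits(text: str, tokens: List[str], keywords: Iterable[str]) -> int:
--     hits = 0
--     for keyword in keywords:
--         if " " in keyword:
--             if keyword in text:
--                 hits += 2
--         elif keyword.endswith("*"):
--             stem = keyword[:-1]
--             hits += sum(1 for token in tokens if token.startswith(stem))
--         else:
--             hits += tokens.count(keyword)
--     return hits
-- ===== SOURCE B (Python) =====
-- from collections import Counter
-- from typing import Dict, Iterable, List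
--
-- def count_keyword_hits(text: str, tokens: List[str], keywords: Iterable[str]) -> int:
--     exact = Counter(tokens)
--     prefixes = Counter()
--     for token in tokens:
--         for i in range(len(token) + 1):
--             prefixes[token[:i]] += 1
--     hits = 0
--     for keyword in keywords:
--         if " " in keyword:
--             if keyword in text:
--                 hits += 2
--         elif keyword.endswith("*"):
--             hits += prefixes[keyword[:-1]]
--         else:
--             hits += exact[keyword]
--     return hits
-- ===== Notes on version B (the rewrite author's own statement) =====
-- stated objective: faster
-- what changed: B precomputes a Counter of tokens and a Counter of all token prefixes once, turning A's per-keyword scans of the token list (tokens.count and a startswith sweep) into O(1) dictionary lookups per keyword.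
import Mathlib
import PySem

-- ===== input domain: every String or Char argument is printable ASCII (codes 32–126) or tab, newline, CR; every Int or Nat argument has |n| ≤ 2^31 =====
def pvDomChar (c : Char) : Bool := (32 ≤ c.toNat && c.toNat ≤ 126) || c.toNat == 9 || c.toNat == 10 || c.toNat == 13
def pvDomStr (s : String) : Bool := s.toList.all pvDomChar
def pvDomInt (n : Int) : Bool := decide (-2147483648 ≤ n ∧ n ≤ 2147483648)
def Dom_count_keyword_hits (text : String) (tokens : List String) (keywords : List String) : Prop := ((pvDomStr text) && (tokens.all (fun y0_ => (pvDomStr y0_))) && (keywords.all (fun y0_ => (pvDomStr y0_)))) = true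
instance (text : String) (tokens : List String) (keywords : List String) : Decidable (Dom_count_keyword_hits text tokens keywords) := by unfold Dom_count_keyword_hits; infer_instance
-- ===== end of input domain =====

-- B replaces A's per-keyword scans of the token list by two counters built once
-- (exact-token counts and prefix counts), so each keyword becomes a dictionary lookup.

-- ===== PORT A =====
-- literal transliteration of A: one loop over keywords; the star branch scans tokens
-- ('sum(1 for token in tokens if token.startswith(stem))', stem = keyword[:-1] inlined)
-- and the default branch is 'tokens.count(keyword)'.
def count_keyword_hits (text : String) (tokens : List String) (keywords : List String) : Int :=
  keywords.foldl (fun hits keyword =>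
    if PySem.Str.isIn " " keyword then
      (if PySem.Str.isIn keyword text then hits + 2 else hits)
    else if PySem.Str.endswith keyword "*" then
      hits + ((tokens.filter (fun token =>
        PySem.Str.startswith token (PySem.Str.slice keyword none (some (-1))))).map
          (fun _ => (1 : Int))).sum
    else
      hits + (PySem.List.count tokens keyword : Int)) 0

-- ===== PORT B =====
-- literal transliteration of B (Source B): Counter(tokens), a Counter of every prefix
-- token[:i] of every token, then one loop over keywords doing lookups.
def count_keyword_hits_alt (text : String) (tokens : List String) (keywords : List String) : Int :=
  let exact : PySem.Dict String Int := PySem.Dict.counter tokens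
  let prefixes : PySem.Dict String Int :=
    tokens.foldl (fun d token =>
      (PySem.List.pyRange 0 (PySem.Str.len token + 1)).foldl
        (fun d i => d.modify (PySem.Str.slice token none (some i)) 0 (· + 1)) d)
      PySem.Dict.empty
  keywords.foldl (fun hits keyword =>
    if PySem.Str.isIn " " keyword then
      (if PySem.Str.isIn keyword text then hits + 2 else hits)
    else if PySem.Str.endswith keyword "*" then
      hits + prefixes.getD (PySem.Str.slice keyword none (some (-1))) 0
    else
      hits + exact.getD keyword 0) 0

-- ===== PRECONDITION & SPEC =====
def Spec_count_keyword_hits (text : String) (tokens : List String) (keywords : List String) (out : Int) : Prop := out = count_keyword_hits_alt text tokens keywords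
instance (text : String) (tokens : List String) (keywords : List String) (out : Int) : Decidable (Spec_count_keyword_hits text tokens keywords out) := by unfold Spec_count_keyword_hits; infer_instance

-- ===== CLAIM (what is proved, stated in full; the proofs are below) =====
def Claim_equal_count_keyword_hits : Prop := ∀ (text : String) (tokens : List String) (keywords : List String), Dom_count_keyword_hits text tokens keywords → Spec_count_keyword_hits text tokens keywords (count_keyword_hits text tokens keywords)

-- ===== LEMMAS AND PROOFS =====

-- how often a query s occurs among the prefixes token[:i] of one token: once if s is a
-- prefix of the token, else never
theorem pv_count_prefixes (t s : String) :
    List.countP (fun (j : Nat) => PySem.Str.slice t none (some (j : Int)) == s)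
      (List.range (t.toList.length + 1)) =
    (if s.toList <+: t.toList then 1 else 0) := by
  have hkey : ∀ j : Nat, (PySem.Str.slice t none (some (j : Int))).toList = t.toList.take j := by
    intro j
    rw [PySem.Str.toList_slice, PySem.Chars.slice_eq_listSlice,
      PySem.List.slice_to _ (by positivity)]
    simp
  have hiff : ∀ j : Nat,
      ((PySem.Str.slice t none (some (j : Int)) == s) = true ↔ t.toList.take j = s.toList) := by
    intro j
    rw [beq_iff_eq, ← String.toList_inj, hkey]
  by_cases hp : s.toList <+: t.toList
  · rw [if_pos hp]
    have hlen : s.toList.length ≤ t.toList.length := hp.length_le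
    rw [List.countP_congr (q := fun j => j == s.toList.length) ?_]
    · rw [← List.count_eq_countP, List.count_range, if_pos (by omega)]
    · intro j hj
      rw [List.mem_range] at hj
      rw [hiff j, beq_iff_eq]
      constructor
      · intro h
        have hl := congrArg List.length h
        rw [List.length_take] at hl
        omega
      · rintro rfl
        exact (List.prefix_iff_eq_take.1 hp).symm
  · rw [if_neg hp, List.countP_eq_zero]
    intro j _ h
    rw [hiff j] at h
    exact hp (h ▸ List.take_prefix j t.toList)

-- one token's inner loop adds its prefix indicator to every entry of the dict
theorem pv_inner_fold_getD (t : String) (d : PySem.Dict String Int) (s : String) :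
    ((PySem.List.pyRange 0 (PySem.Str.len t + 1)).foldl
      (fun d i => d.modify (PySem.Str.slice t none (some i)) 0 (· + 1)) d).getD s 0 =
    d.getD s 0 + (if s.toList <+: t.toList then 1 else 0) := by
  have hr : PySem.Str.len t + 1 = ((t.toList.length + 1 : Nat) : Int) := by
    rw [PySem.Str.len_eq]; push_cast; ring
  rw [hr, PySem.List.pyRange_zero_natCast, List.foldl_map,
    ← List.foldl_map (f := fun j : Nat => PySem.Str.slice t none (some (j : Int)))
      (g := fun (d : PySem.Dict String Int) x => d.modify x 0 (· + 1)),
    PySem.Dict.getD_foldl_modify_add_one, List.count_eq_countP,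
    List.countP_map]
  rw [show ((fun x => x == s) ∘ fun j : Nat => PySem.Str.slice t none (some (j : Int))) =
      (fun (j : Nat) => PySem.Str.slice t none (some (j : Int)) == s) from rfl,
    pv_count_prefixes]
  split <;> simp

-- the whole prefix counter counts, at s, the tokens having s as a prefix
theorem pv_prefixes_getD (tokens : List String) (d : PySem.Dict String Int) (s : String) :
    (tokens.foldl (fun d token =>
        (PySem.List.pyRange 0 (PySem.Str.len token + 1)).foldl
          (fun d i => d.modify (PySem.Str.slice token none (some i)) 0 (· + 1)) d) d).getD s 0 =
    d.getD s 0 + (tokens.countP (fun t => decide (s.toList <+: t.toList)) : Int) := by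
  induction tokens generalizing d with
  | nil => simp
  | cons t ts ih =>
    rw [List.foldl_cons, ih, pv_inner_fold_getD, List.countP_cons]
    by_cases h : s.toList <+: t.toList
    · simp [h]
      try ring
    · simp [h]
      try ring

-- ===== VERDICT (by name: the statement is the Claim_ definition above) =====
theorem count_keyword_hits_spec : Claim_equal_count_keyword_hits := by
  intro text tokens keywords _
  show count_keyword_hits text tokens keywords = count_keyword_hits_alt text tokens keywords
  rw [show count_keyword_hits_alt text tokens keywords =
      keywords.foldl (fun hits keyword =>
        if PySem.Str.isIn " " keyword then
          (if PySem.Str.isIn keyword text then hits + 2 else hits)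
        else if PySem.Str.endswith keyword "*" then
          hits + (tokens.foldl (fun d token =>
              (PySem.List.pyRange 0 (PySem.Str.len token + 1)).foldl
                (fun d i => d.modify (PySem.Str.slice token none (some i)) 0 (· + 1)) d)
            PySem.Dict.empty).getD (PySem.Str.slice keyword none (some (-1))) 0
        else
          hits + (PySem.Dict.counter tokens).getD keyword 0) 0 from rfl,
    show count_keyword_hits text tokens keywords =
      keywords.foldl (fun hits keyword =>
        if PySem.Str.isIn " " keyword then
          (if PySem.Str.isIn keyword text then hits + 2 else hits)
        else if PySem.Str.endswith keyword "*" then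
          hits + ((tokens.filter (fun token =>
            PySem.Str.startswith token (PySem.Str.slice keyword none (some (-1))))).map
              (fun _ => (1 : Int))).sum
        else
          hits + (PySem.List.count tokens keyword : Int)) 0 from rfl]
  refine PySem.List.foldl_congr_mem keywords _ _ 0 ?_
  intro hits keyword _
  by_cases h1 : PySem.Str.isIn " " keyword = true
  · rw [if_pos h1, if_pos h1]
  · rw [if_neg h1, if_neg h1]
    by_cases h2 : PySem.Str.endswith keyword "*" = true
    · rw [if_pos h2, if_pos h2]
      have hpq : (tokens.filter (fun token =>
            PySem.Str.startswith token (PySem.Str.slice keyword none (some (-1))))).length =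
          tokens.countP (fun t =>
            decide ((PySem.Str.slice keyword none (some (-1))).toList <+: t.toList)) := by
        rw [← List.countP_eq_length_filter]
        apply List.countP_congr
        intro t _
        rw [PySem.Str.startswith_eq, PySem.Chars.startswith_iff]
        exact (decide_eq_true_iff).symm
      rw [pv_prefixes_getD, PySem.Dict.getD_empty, zero_add,
        PySem.List.sum_map_const_int, mul_one, hpq]
    · rw [if_neg h2, if_neg h2, PySem.Dict.getD_counter]
      rfl
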